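-- pv_equiv track=rewrite | github.com/A3Tom/challenges | project_euler/problem/003/solution.py | check_incremental
-- ===== SOURCE A (Python) =====
-- def check_incremental(n):
--     prime_factors = []
--     cur = 1
--     half_n = n//2
--
--     while cur < half_n:
--         if n % cur == 0 and is_prime(cur):
--             prime_factors.append(cur)
--
--         cur += 1
--
--     return prime_factors
--
-- def is_prime(n):
--     half_n = (n//2) + 1
--     for i in range(2, half_n):
--         if i > 2 and i % 2 == 0:
--             continue
--         if n % i == 0:
--             return False
--     return True
-- ===== SOURCE B (Python) =====
-- def check_incremental(n):
--     half = n // 2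
--     if half <= 1:
--         return []
--     res = [1]
--     m = n
--     d = 2
--     while d * d <= m:
--         if m % d == 0:
--             if d < half:
--                 res.append(d)
--             while m % d == 0:
--                 m //= d
--         d += 1
--     if m > 1 and m < half:
--         res.append(m)
--     return res
-- ===== Notes on version B (the rewrite author's own statement) =====
-- stated objective: faster
-- what changed: A scans every cur below n//2 and tests each with an O(cur) trial primality loop (O(n^2) overall); B factorizes n once by trial division up to sqrt(n), collecting its distinct prime factors below n//2 after the initial 1.
import Mathlib
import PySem

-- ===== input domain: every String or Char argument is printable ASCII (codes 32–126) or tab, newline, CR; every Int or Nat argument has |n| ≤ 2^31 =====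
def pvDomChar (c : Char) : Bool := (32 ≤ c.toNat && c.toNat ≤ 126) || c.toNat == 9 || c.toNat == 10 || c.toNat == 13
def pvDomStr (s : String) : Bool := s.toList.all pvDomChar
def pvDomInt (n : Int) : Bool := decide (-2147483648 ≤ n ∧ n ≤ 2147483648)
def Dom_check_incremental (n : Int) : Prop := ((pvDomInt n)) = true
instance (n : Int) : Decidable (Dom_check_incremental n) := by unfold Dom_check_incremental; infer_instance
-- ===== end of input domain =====

-- B replaces A's scan of every cur below n//2 (each tested by a linear primality loop)
-- by trial-division factorization of n up to sqrt(n); objective: faster.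
-- Loops are ported with an explicit fuel argument equal to an upper bound on the
-- Python loop's iteration count (fuel only makes termination structural; the
-- computation is the same on every input).

-- ===== PORT A =====
-- is_prime: 'for i in range(2, n//2+1): if i>2 and i%2==0: continue; if n%i==0: return False; return True'
def isPrimeA (c : Int) : Bool :=
  (PySem.List.pyRange 2 (PySem.Int.floordiv c 2 + 1) 1).all fun i =>
    if 2 < i ∧ PySem.Int.mod i 2 = 0 then true
    else decide (¬ PySem.Int.mod c i = 0)

-- 'while cur < half_n: if n % cur == 0 and is_prime(cur): prime_factors.append(cur); cur += 1'
def checkLoopA (n half : Int) : Nat → Int → List Int → List Int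
  | 0, _, acc => acc
  | f + 1, cur, acc =>
    if cur < half then
      checkLoopA n half f (cur + 1)
        (if PySem.Int.mod n cur = 0 ∧ isPrimeA cur = true then acc ++ [cur] else acc)
    else acc

def check_incremental (n : Int) : List Int :=
  checkLoopA n (PySem.Int.floordiv n 2) (PySem.Int.floordiv n 2 - 1).toNat 1 []

-- ===== PORT B =====
-- 'while m % d == 0: m //= d'  (fuel m.toNat bounds the number of divisions)
def divOutB : Nat → Int → Int → Int
  | 0, m, _ => m
  | f + 1, m, d => if PySem.Int.mod m d = 0 then divOutB f (PySem.Int.floordiv m d) d else m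

-- 'while d * d <= m: if m % d == 0: (append d if d < half); strip d from m; d += 1'
def factLoopB (half : Int) : Nat → Int → Int → List Int → Int × List Int
  | 0, m, _, res => (m, res)
  | f + 1, m, d, res =>
    if d * d ≤ m then
      if PySem.Int.mod m d = 0 then
        factLoopB half f (divOutB m.toNat m d) (d + 1) (if d < half then res ++ [d] else res)
      else factLoopB half f m (d + 1) res
    else (m, res)

def check_incremental_alt (n : Int) : List Int :=
  let half := PySem.Int.floordiv n 2
  if half ≤ 1 then []
  else
    let r := factLoopB half n.toNat n 2 [1]
    if 1 < r.1 ∧ r.1 < half then r.2 ++ [r.1] else r.2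

-- ===== PRECONDITION & SPEC =====
def Spec_check_incremental (n : Int) (out : List Int) : Prop := out = check_incremental_alt n
instance (n : Int) (out : List Int) : Decidable (Spec_check_incremental n out) := by unfold Spec_check_incremental; infer_instance

-- ===== CLAIM (what is proved, stated in full; the proofs are below) =====
def Claim_equal_check_incremental : Prop := ∀ (n : Int), Dom_check_incremental n → Spec_check_incremental n (check_incremental n)

-- ===== LEMMAS AND PROOFS =====

-- the predicate A's scan really tests: c divides n and c is 1 or a prime
def predB (n c : Int) : Bool :=
  (PySem.Int.mod n c == 0) && (c == 1 || decide (Nat.Prime c.toNat))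

theorem predB_iff (n c : Int) : predB n c = true ↔ (c ∣ n ∧ (c = 1 ∨ Nat.Prime c.toNat)) := by
  simp [predB, PySem.Int.mod_eq_zero_iff_dvd]

theorem int_dvd_toNat {a b : Int} (ha : 0 ≤ a) (hb : 0 ≤ b) (h : a ∣ b) : a.toNat ∣ b.toNat := by
  have h1 : ((a.toNat : Int)) = a := by omega
  have h2 : ((b.toNat : Int)) = b := by omega
  rw [← Int.natCast_dvd_natCast, h1, h2]
  exact h

theorem checkLoopA_filter (n half : Int) :
    ∀ (f : Nat) (cur : Int) (acc : List Int), (half - cur).toNat ≤ f →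
      checkLoopA n half f cur acc =
        acc ++ (PySem.List.pyRange cur half 1).filter
          (fun c => decide (PySem.Int.mod n c = 0 ∧ isPrimeA c = true)) := by
  intro f
  induction f with
  | zero =>
    intro cur acc hf
    rw [checkLoopA, PySem.List.pyRange_one_eq_nil (by omega)]
    simp
  | succ f ih =>
    intro cur acc hf
    rw [checkLoopA]
    by_cases h : cur < half
    · rw [if_pos h, PySem.List.pyRange_one_cons h, List.filter_cons,
        ih (cur + 1) _ (by omega)]
      by_cases hc : PySem.Int.mod n cur = 0 ∧ isPrimeA cur = true
      · rw [if_pos hc]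
        simp [hc]
      · rw [if_neg hc]
        simp [hc]
    · rw [if_neg h, PySem.List.pyRange_one_eq_nil (by omega)]
      simp

theorem isPrimeA_correct (c : Int) (hc : 1 ≤ c) :
    isPrimeA c = true ↔ (c = 1 ∨ Nat.Prime c.toNat) := by
  unfold isPrimeA
  rw [List.all_eq_true]
  constructor
  · intro hall
    by_cases h1 : c = 1
    · exact Or.inl h1
    right
    by_contra hnp
    have hc2 : 2 ≤ c := by omega
    have hcn : c.toNat ≠ 1 := by omega
    set p := c.toNat.minFac with hp_def
    have hp : p.Prime := Nat.minFac_prime hcn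
    have hpd : p ∣ c.toNat := Nat.minFac_dvd _
    have hp2 : 2 ≤ p := hp.two_le
    have hsq : p * p ≤ c.toNat := by
      have h := Nat.minFac_sq_le_self (by omega) hnp
      rwa [pow_two] at h
    have hsqz : (p : Int) * (p : Int) ≤ c := by
      have h3 : ((c.toNat : Int)) = c := by omega
      calc (p : Int) * (p : Int) = ((p * p : Nat) : Int) := by push_cast; ring
        _ ≤ ((c.toNat : Int)) := by exact_mod_cast hsq
        _ = c := h3
    have hpi : ((p : Int)) ∣ c := by
      have h4 : ((p:Int)) ∣ (c.toNat : Int) := Int.natCast_dvd_natCast.2 hpd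
      rwa [Int.toNat_of_nonneg (by omega)] at h4
    have hmem : (p : Int) ∈ PySem.List.pyRange 2 (PySem.Int.floordiv c 2 + 1) 1 := by
      rw [PySem.List.mem_pyRange_one]
      refine ⟨by exact_mod_cast hp2, ?_⟩
      have hle : (p : Int) ≤ PySem.Int.floordiv c 2 := by
        rw [PySem.Int.le_floordiv_iff_mul_le (by omega)]
        have hpp : (2:Int) ≤ (p:Int) := by exact_mod_cast hp2
        nlinarith
      omega
    have hfp := hall _ hmem
    by_cases hsk : 2 < ((p:Int)) ∧ PySem.Int.mod ((p:Int)) 2 = 0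
    · obtain ⟨hgt, hev⟩ := hsk
      have he1 : (2:Int) ∣ ((p:Int)) := (PySem.Int.mod_eq_zero_iff_dvd _ _).1 hev
      have he2 : (2:Nat) ∣ p := by exact_mod_cast he1
      have he3 := Nat.Prime.eq_one_or_self_of_dvd hp 2 he2
      have hgt' : 2 < p := by exact_mod_cast hgt
      omega
    · rw [if_neg hsk, decide_eq_true_eq] at hfp
      exact hfp ((PySem.Int.mod_eq_zero_iff_dvd c ((p:Int))).2 hpi)
  · intro hor i hi
    rw [PySem.List.mem_pyRange_one] at hi
    rcases hor with h1 | hpr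
    · exfalso
      subst h1
      have h0 : PySem.Int.floordiv 1 2 = 0 := by
        rw [PySem.Int.floordiv_eq_ediv_of_pos (by omega)]
        decide
      omega
    · split_ifs with hsk
      · rfl
      · rw [decide_eq_true_eq]
        intro hmod
        have hdvd : i ∣ c := (PySem.Int.mod_eq_zero_iff_dvd c i).1 hmod
        have hc2 : 2 ≤ c := by have := hpr.two_le; omega
        have hhalf : PySem.Int.floordiv c 2 = c / 2 := PySem.Int.floordiv_eq_ediv_of_pos (by omega)
        have hic : i < c := by rw [hhalf] at hi; omega
        have hnat : i.toNat ∣ c.toNat := int_dvd_toNat (by omega) (by omega) hdvd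
        rcases Nat.Prime.eq_one_or_self_of_dvd hpr _ hnat with he | he <;> omega

theorem A_as_filter (n : Int) :
    check_incremental n = (PySem.List.pyRange 1 (PySem.Int.floordiv n 2) 1).filter (predB n) := by
  rw [check_incremental, checkLoopA_filter n _ _ 1 [] (by omega), List.nil_append]
  apply List.filter_congr
  intro c hcmem
  rw [PySem.List.mem_pyRange_one] at hcmem
  have hc1 : (1:Int) ≤ c := hcmem.1
  rw [Bool.eq_iff_iff, predB_iff, decide_eq_true_eq, PySem.Int.mod_eq_zero_iff_dvd,
    isPrimeA_correct c hc1]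

theorem filter_single (a b m : Int) (p : Int → Bool) (h1 : a ≤ m) (h2 : m < b)
    (h : ∀ c, a ≤ c → c < b → (p c = true ↔ c = m)) :
    (PySem.List.pyRange a b 1).filter p = [m] := by
  rw [PySem.List.pyRange_one_append a m b h1 (by omega),
      PySem.List.pyRange_one_cons h2, List.filter_append, List.filter_cons]
  have e1 : (PySem.List.pyRange a m 1).filter p = [] := by
    rw [List.filter_eq_nil_iff]
    intro c hc
    rw [PySem.List.mem_pyRange_one] at hc
    simp only [Bool.not_eq_true]
    rw [Bool.eq_false_iff, Ne, h c hc.1 (by omega)]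
    omega
  have e2 : (PySem.List.pyRange (m+1) b 1).filter p = [] := by
    rw [List.filter_eq_nil_iff]
    intro c hc
    rw [PySem.List.mem_pyRange_one] at hc
    simp only [Bool.not_eq_true]
    rw [Bool.eq_false_iff, Ne, h c (by omega) hc.2]
    omega
  have e3 : p m = true := (h m h1 h2).2 rfl
  rw [e1, e2, e3]
  simp

theorem divOutB_le_pos (d : Int) (hd : 2 ≤ d) :
    ∀ (f : Nat) (m : Int), 0 < m → divOutB f m d ≤ m ∧ 0 < divOutB f m d := by
  intro f
  induction f with
  | zero => intro m hm; rw [divOutB]; omega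
  | succ f ih =>
    intro m hm
    rw [divOutB]
    by_cases hmod : PySem.Int.mod m d = 0
    · rw [if_pos hmod]
      obtain ⟨k, hk⟩ := (PySem.Int.mod_eq_zero_iff_dvd m d).1 hmod
      have hk0 : 0 < k := by nlinarith
      have hdk : PySem.Int.floordiv m d = k := by
        rw [PySem.Int.floordiv_eq_ediv_of_pos (by omega), hk, Int.mul_ediv_cancel_left _ (by omega)]
      rw [hdk]
      have := ih k hk0
      have : k < m := by nlinarith
      have := ih k hk0
      omega
    · rw [if_neg hmod]
      omega

theorem divOutB_dvd (d : Int) (hd : 2 ≤ d) :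
    ∀ (f : Nat) (m : Int), 0 < m → divOutB f m d ∣ m := by
  intro f
  induction f with
  | zero => intro m hm; rw [divOutB]
  | succ f ih =>
    intro m hm
    rw [divOutB]
    by_cases hmod : PySem.Int.mod m d = 0
    · rw [if_pos hmod]
      obtain ⟨k, hk⟩ := (PySem.Int.mod_eq_zero_iff_dvd m d).1 hmod
      have hk0 : 0 < k := by nlinarith
      have hdk : PySem.Int.floordiv m d = k := by
        rw [PySem.Int.floordiv_eq_ediv_of_pos (by omega), hk, Int.mul_ediv_cancel_left _ (by omega)]
      rw [hdk]
      exact (ih k hk0).trans ⟨d, by linarith [hk]⟩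
    · rw [if_neg hmod]

theorem divOutB_not_dvd (d : Int) (hd : 2 ≤ d) :
    ∀ (f : Nat) (m : Int), 0 < m → m.toNat ≤ f → ¬ d ∣ divOutB f m d := by
  intro f
  induction f with
  | zero => intro m hm hf; omega
  | succ f ih =>
    intro m hm hf
    rw [divOutB]
    by_cases hmod : PySem.Int.mod m d = 0
    · rw [if_pos hmod]
      obtain ⟨k, hk⟩ := (PySem.Int.mod_eq_zero_iff_dvd m d).1 hmod
      have hk0 : 0 < k := by nlinarith
      have hdk : PySem.Int.floordiv m d = k := by
        rw [PySem.Int.floordiv_eq_ediv_of_pos (by omega), hk, Int.mul_ediv_cancel_left _ (by omega)]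
      rw [hdk]
      have hkm : k < m := by nlinarith
      exact ih k hk0 (by omega)
    · rw [if_neg hmod]
      exact fun h => hmod ((PySem.Int.mod_eq_zero_iff_dvd m d).2 h)

theorem divOutB_prime_dvd (d p : Int) (hp : Prime p) (hdp : Prime d) (hpos : 0 < p)
    (hd : 2 ≤ d) (hne : p ≠ d) :
    ∀ (f : Nat) (m : Int), 0 < m → p ∣ m → p ∣ divOutB f m d := by
  intro f
  induction f with
  | zero => intro m hm hdvd; rw [divOutB]; exact hdvd
  | succ f ih =>
    intro m hm hdvd
    rw [divOutB]
    by_cases hmod : PySem.Int.mod m d = 0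
    · rw [if_pos hmod]
      obtain ⟨k, hk⟩ := (PySem.Int.mod_eq_zero_iff_dvd m d).1 hmod
      have hk0 : 0 < k := by nlinarith
      have hdk : PySem.Int.floordiv m d = k := by
        rw [PySem.Int.floordiv_eq_ediv_of_pos (by omega), hk, Int.mul_ediv_cancel_left _ (by omega)]
      rw [hdk]
      apply ih k hk0
      rcases hp.dvd_mul.1 (hk ▸ hdvd) with h1 | h1
      · exfalso
        have h2 : p.natAbs = d.natAbs :=
          (Nat.prime_dvd_prime_iff_eq (Int.prime_iff_natAbs_prime.1 hp)
            (Int.prime_iff_natAbs_prime.1 hdp)).1 (Int.natAbs_dvd_natAbs.2 h1)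
        exact hne (by omega)
      · exact h1
    · rw [if_neg hmod]
      exact hdvd

theorem factLoopB_exit (n half m d : Int) (res : List Int)
    (hhalf2 : 2 ≤ half)
    (hexit : m < d * d) (hm : 0 < m) (hmn : m ∣ n) (hd : 2 ≤ d)
    (H1 : ∀ q, 2 ≤ q → q ∣ m → d ≤ q)
    (H2 : ∀ p, 0 < p → Nat.Prime p.toNat → p ∣ n → d ≤ p → p ∣ m)
    (H3 : res = (PySem.List.pyRange 1 (min d half) 1).filter (predB n)) :
    (if 1 < m ∧ m < half then res ++ [m] else res) =
      (PySem.List.pyRange 1 half 1).filter (predB n) := by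
  have hS : m = 1 ∨ Nat.Prime m.toNat := by
    by_cases h1 : m = 1
    · exact Or.inl h1
    · right
      by_contra hnp
      set q := m.toNat.minFac with hq_def
      have hq : q.Prime := Nat.minFac_prime (by omega)
      have hqd : (q:Int) ∣ m := by
        have h1' := Nat.minFac_dvd m.toNat
        have h2 : ((m.toNat:Int)) = m := by omega
        rw [← h2]
        exact_mod_cast h1'
      have hq2 : 2 ≤ (q:Int) := by exact_mod_cast hq.two_le
      have hdq : d ≤ (q:Int) := H1 _ hq2 hqd
      have hsq : (q:Int)*(q:Int) ≤ m := by
        have h := Nat.minFac_sq_le_self (by omega) hnp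
        rw [pow_two] at h
        have h2 : ((m.toNat:Int)) = m := by omega
        calc ((q:Int))*((q:Int)) = ((q*q:Nat):Int) := by push_cast; ring
          _ ≤ ((m.toNat:Int)) := by exact_mod_cast h
          _ = m := h2
      nlinarith
  have hD2 : (2:Int) ≤ min d half := le_min hd hhalf2
  rw [PySem.List.pyRange_one_append 1 (min d half) half (by omega) (min_le_right _ _),
    List.filter_append, ← H3]
  have htail : (PySem.List.pyRange (min d half) half 1).filter (predB n) =
      (if 1 < m ∧ m < half then ([m]:List Int) else []) := by
    rcases hS with h1 | hpr
    · rw [if_neg (by omega)]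
      rw [List.filter_eq_nil_iff]
      intro c hcmem hpc
      rw [PySem.List.mem_pyRange_one] at hcmem
      rw [predB_iff] at hpc
      obtain ⟨hcn, hcor⟩ := hpc
      have hc2 : 2 ≤ c := le_trans hD2 hcmem.1
      rcases hcor with hc1 | hcp
      · omega
      · by_cases hdh : d ≤ half
        · have hmin : min d half = d := min_eq_left hdh
          have hcd : d ≤ c := by rw [hmin] at hcmem; exact hcmem.1
          have hcm : c ∣ m := H2 c (by omega) hcp hcn hcd
          have := Int.le_of_dvd (by omega) hcm
          omega
        · rw [min_eq_right (by omega)] at hcmem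
          omega
    · have hm2 : 2 ≤ m := by have := hpr.two_le; omega
      have hdm : d ≤ m := H1 m hm2 dvd_rfl
      by_cases hmh : m < half
      · rw [if_pos ⟨by omega, hmh⟩]
        apply filter_single
        · exact le_trans (min_le_left d half) hdm
        · exact hmh
        · intro c hcl hcu
          rw [predB_iff]
          constructor
          · rintro ⟨hcn, hc1 | hcp⟩
            · have : (2:Int) ≤ c := le_trans hD2 hcl
              omega
            · have hc2 : (2:Int) ≤ c := le_trans hD2 hcl
              have hcd : d ≤ c := by
                have hmin : min d half = d := min_eq_left (by omega)
                rw [hmin] at hcl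
                exact hcl
              have hcm : c ∣ m := H2 c (by omega) hcp hcn hcd
              have hnat : c.toNat ∣ m.toNat := int_dvd_toNat (by omega) (by omega) hcm
              rcases hpr.eq_one_or_self_of_dvd _ hnat with he | he <;> omega
          · rintro rfl
            exact ⟨hmn, Or.inr hpr⟩
      · rw [if_neg (fun h => hmh h.2)]
        rw [List.filter_eq_nil_iff]
        intro c hcmem hpc
        rw [PySem.List.mem_pyRange_one] at hcmem
        rw [predB_iff] at hpc
        obtain ⟨hcn, hcor⟩ := hpc
        have hc2 : 2 ≤ c := le_trans hD2 hcmem.1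
        rcases hcor with hc1 | hcp
        · omega
        · by_cases hdh : d ≤ half
          · have hmin : min d half = d := min_eq_left hdh
            have hcd : d ≤ c := by rw [hmin] at hcmem; exact hcmem.1
            have hcm : c ∣ m := H2 c (by omega) hcp hcn hcd
            have hnat : c.toNat ∣ m.toNat := int_dvd_toNat (by omega) (by omega) hcm
            rcases hpr.eq_one_or_self_of_dvd _ hnat with he | he <;> omega
          · rw [min_eq_right (by omega)] at hcmem
            omega
  rw [htail]
  by_cases hcond : 1 < m ∧ m < half
  · rw [if_pos hcond, if_pos hcond]
  · rw [if_neg hcond, if_neg hcond, List.append_nil]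

theorem factLoopB_go (n half : Int) (hhalf2 : 2 ≤ half) :
    ∀ (f : Nat) (m d : Int) (res : List Int), (m + 2 - d).toNat ≤ f →
      0 < m → m ∣ n → 2 ≤ d →
      (∀ q, 2 ≤ q → q ∣ m → d ≤ q) →
      (∀ p, 0 < p → Nat.Prime p.toNat → p ∣ n → d ≤ p → p ∣ m) →
      res = (PySem.List.pyRange 1 (min d half) 1).filter (predB n) →
      (if 1 < (factLoopB half f m d res).1 ∧ (factLoopB half f m d res).1 < half
        then (factLoopB half f m d res).2 ++ [(factLoopB half f m d res).1]
        else (factLoopB half f m d res).2) =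
        (PySem.List.pyRange 1 half 1).filter (predB n) := by
  intro f
  induction f with
  | zero =>
    intro m d res hf hm hmn hd H1 H2 H3
    have h0 : m + 2 - d ≤ 0 := by omega
    have hexit : m < d * d := by nlinarith
    rw [factLoopB]
    exact factLoopB_exit n half m d res hhalf2 hexit hm hmn hd H1 H2 H3
  | succ f ih =>
    intro m d res hf hm hmn hd H1 H2 H3
    rw [factLoopB]
    by_cases hdd : d * d ≤ m
    · have h2d : 2 * d ≤ d * d := by nlinarith
      have hdm2 : 2 * d ≤ m := le_trans h2d hdd
      rw [if_pos hdd]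
      by_cases hdvd : PySem.Int.mod m d = 0
      · rw [if_pos hdvd]
        have hddm : d ∣ m := (PySem.Int.mod_eq_zero_iff_dvd m d).1 hdvd
        have hdprime : Nat.Prime d.toNat := by
          set e := d.toNat.minFac with he_def
          have he : e.Prime := Nat.minFac_prime (by omega)
          have hed : (e:Int) ∣ d := by
            have h1' := Nat.minFac_dvd d.toNat
            have h2 : ((d.toNat:Int)) = d := by omega
            rw [← h2]
            exact_mod_cast h1'
          have he2 : 2 ≤ (e:Int) := by exact_mod_cast he.two_le
          have hde : d ≤ (e:Int) := H1 _ he2 (hed.trans hddm)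
          have hel : (e:Int) ≤ d := Int.le_of_dvd (by omega) hed
          have heq : e = d.toNat := by omega
          rw [← heq]
          exact he
        have hlp := divOutB_le_pos d hd m.toNat m hm
        have hdvd' := divOutB_dvd d hd m.toNat m hm
        have hnd := divOutB_not_dvd d hd m.toNat m hm le_rfl
        apply ih
        · omega
        · exact hlp.2
        · exact hdvd'.trans hmn
        · omega
        · intro q hq2 hqm
          have hdq : d ≤ q := H1 q hq2 (hqm.trans hdvd')
          rcases eq_or_lt_of_le hdq with he | hlt
          · exact absurd (he ▸ hqm) hnd
          · omega
        · intro p hp0 hpp hpn hdp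
          have hpm : p ∣ m := H2 p hp0 hpp hpn (by omega)
          apply divOutB_prime_dvd d p ?_ ?_ hp0 hd ?_ m.toNat m hm hpm
          · rw [Int.prime_iff_natAbs_prime]
            have hab : p.natAbs = p.toNat := by omega
            rw [hab]
            exact hpp
          · rw [Int.prime_iff_natAbs_prime]
            have hab : d.natAbs = d.toNat := by omega
            rw [hab]
            exact hdprime
          · omega
        · by_cases hdh : d < half
          · rw [if_pos hdh, H3, min_eq_left (by omega), min_eq_left (by omega),
              PySem.List.pyRange_one_succ_right (by omega), List.filter_append]
            have hpd : predB n d = true := by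
              rw [predB_iff]
              exact ⟨hddm.trans hmn, Or.inr hdprime⟩
            simp [hpd]
          · rw [if_neg hdh, H3, min_eq_right (by omega), min_eq_right (by omega)]
      · rw [if_neg hdvd]
        have hndm : ¬ d ∣ m := fun h => hdvd ((PySem.Int.mod_eq_zero_iff_dvd m d).2 h)
        apply ih
        · omega
        · exact hm
        · exact hmn
        · omega
        · intro q hq2 hqm
          have hdq := H1 q hq2 hqm
          rcases eq_or_lt_of_le hdq with he | hlt
          · exact absurd (he ▸ hqm) hndm
          · omega
        · intro p hp0 hpp hpn hdp
          exact H2 p hp0 hpp hpn (by omega)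
        · by_cases hdh : d < half
          · rw [H3, min_eq_left (by omega), min_eq_left (by omega),
              PySem.List.pyRange_one_succ_right (by omega), List.filter_append]
            have hpd : predB n d = false := by
              rw [Bool.eq_false_iff, Ne, predB_iff]
              rintro ⟨hdn, h1 | hp⟩
              · omega
              · exact hndm (H2 d (by omega) hp hdn le_rfl)
            simp [hpd]
          · rw [H3, min_eq_right (by omega), min_eq_right (by omega)]
    · rw [if_neg hdd]
      have hexit : m < d * d := not_le.1 hdd
      exact factLoopB_exit n half m d res hhalf2 hexit hm hmn hd H1 H2 H3

-- ===== VERDICT (by name: the statement is the Claim_ definition above) =====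
theorem check_incremental_spec : Claim_equal_check_incremental := by
  unfold Claim_equal_check_incremental
  intro n _
  unfold Spec_check_incremental
  rw [A_as_filter]
  simp only [check_incremental_alt]
  have he : PySem.Int.floordiv n 2 = n / 2 := PySem.Int.floordiv_eq_ediv_of_pos (by omega)
  by_cases h1 : PySem.Int.floordiv n 2 ≤ 1
  · rw [if_pos h1, PySem.List.pyRange_one_eq_nil (by omega)]
    rfl
  · rw [if_neg h1]
    have hhalf2 : 2 ≤ PySem.Int.floordiv n 2 := by omega
    have hn4 : 4 ≤ n := by rw [he] at hhalf2; omega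
    have hres : ([1]:List Int) =
        (PySem.List.pyRange 1 (min 2 (PySem.Int.floordiv n 2)) 1).filter (predB n) := by
      rw [min_eq_left hhalf2]
      have h2 : (2:Int) = 1 + 1 := by norm_num
      rw [h2, PySem.List.pyRange_one_singleton]
      have hp1 : predB n 1 = true := predB_iff n 1 |>.2 ⟨one_dvd n, Or.inl rfl⟩
      simp [List.filter, hp1]
    exact (factLoopB_go n (PySem.Int.floordiv n 2) hhalf2 n.toNat n 2 [1]
      (by omega) (by omega) dvd_rfl (by omega)
      (fun q hq _ => hq) (fun p _ _ hpn _ => hpn) hres).symm
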